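-- pv_equiv track=rewrite | github.com/danilonumeroso/advent_of_code | day_19/02.py | reduce_cond
-- ===== SOURCE A (Python) =====
-- MIN_NUMBER = 1
--
-- MAX_NUMBER = 4000
--
-- def reduce_cond(conditions):
--     """
--         Given a list of conditions, returns a tuple (greater_than, less_than) where:
--             - less_than is the maximum number that is less than all the numbers in the conditions
--             - greater_than is the minimum number that is greater than all the numbers in the conditions
--         Example:
--             ['x<8', 'x>3','x>5'] -> [5, 8]
--     """
--     less_than, greater_than = MAX_NUMBER+1, MIN_NUMBER
--     for cond in conditions:
--         if '<' in cond:
--             less_than = min(less_than, int(cond.split('<')[1]))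
--         elif '>' in cond:
--             greater_than = max(greater_than, int(cond.split('>')[1]))
--     return (greater_than, less_than)
-- ===== SOURCE B (Python) =====
-- MIN_NUMBER = 1
--
-- MAX_NUMBER = 4000
--
-- def reduce_cond(conditions):
--     # Divide and conquer: each single condition yields its own (greater_than, less_than)
--     # bound pair, and two half-ranges merge by (max of greaters, min of lessers).
--     def solve(lo, hi):
--         if hi - lo <= 1:
--             if lo == hi:
--                 return (MIN_NUMBER, MAX_NUMBER + 1)
--             c = conditions[lo]
--             if '<' in c:
--                 return (MIN_NUMBER, min(int(c.split('<')[1]), MAX_NUMBER + 1))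
--             if '>' in c:
--                 return (max(int(c.split('>')[1]), MIN_NUMBER), MAX_NUMBER + 1)
--             return (MIN_NUMBER, MAX_NUMBER + 1)
--         mid = (lo + hi) // 2
--         g1, l1 = solve(lo, mid)
--         g2, l2 = solve(mid, hi)
--         return (max(g1, g2), min(l1, l2))
--     return solve(0, len(conditions))
-- ===== Notes on version B (the rewrite author's own statement) =====
-- stated objective: alternative
-- what changed: Replaces A's single forward loop mutating a (less_than, greater_than) accumulator with a divide-and-conquer over index ranges: each single condition yields its own bound pair and two half-ranges are merged by (max of greater-bounds, min of less-bounds), correct because min/max are associative and commutative.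
-- outside the precondition, e.g. on reduce_cond(['x<abc']): A raises ValueError, B raises ValueError
import Mathlib
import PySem

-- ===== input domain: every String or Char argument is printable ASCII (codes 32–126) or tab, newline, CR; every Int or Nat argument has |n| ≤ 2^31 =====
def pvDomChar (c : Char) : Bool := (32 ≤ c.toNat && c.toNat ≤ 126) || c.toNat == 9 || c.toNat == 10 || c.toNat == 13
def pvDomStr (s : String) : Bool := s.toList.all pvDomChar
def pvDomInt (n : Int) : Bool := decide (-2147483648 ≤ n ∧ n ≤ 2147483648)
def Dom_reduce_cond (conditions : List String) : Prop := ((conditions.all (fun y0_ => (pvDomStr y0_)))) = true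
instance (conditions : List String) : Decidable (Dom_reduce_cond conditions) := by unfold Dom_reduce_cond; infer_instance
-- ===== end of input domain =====

-- B replaces A's forward loop over a mutable (less_than, greater_than) pair with a
-- divide-and-conquer over index ranges merging half-range bound pairs (objective: alternative).

-- shared helper: cond.split(sep)[1] (as a string; used by both ports and by Pre_)
def pvSecond (cond sep : String) : String :=
  (PySem.List.pyGet? ((PySem.Str.split? cond sep).getD []) 1).getD ""

-- int(cond.split(sep)[1]); the .getD 0 default is never reached under Pre_reduce_cond
def pvIntAfter (cond sep : String) : Int :=
  (PySem.Int.ofStr? (pvSecond cond sep)).getD 0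

-- ===== PORT A =====
def reduce_cond (conditions : List String) : Int × Int :=
  -- less_than, greater_than = MAX_NUMBER+1, MIN_NUMBER; then one forward fold over conditions
  let st := conditions.foldl
    (fun (st : Int × Int) cond =>
      if PySem.Str.isIn "<" cond then (min st.1 (pvIntAfter cond "<"), st.2)
      else if PySem.Str.isIn ">" cond then (st.1, max st.2 (pvIntAfter cond ">"))
      else st)
    (4001, 1)
  (st.2, st.1)

-- ===== PORT B =====
-- solve(lo, hi): bound pair of conditions[lo:hi] by splitting the index range at the midpoint
def pvSolve (conditions : List String) (lo hi : Nat) : Int × Int :=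
  if hi - lo ≤ 1 then
    if lo = hi then (1, 4001)
    else
      let c := (PySem.List.pyGet? conditions (lo : Int)).getD ""   -- conditions[lo]
      if PySem.Str.isIn "<" c then (1, min (pvIntAfter c "<") 4001)
      else if PySem.Str.isIn ">" c then (max (pvIntAfter c ">") 1, 4001)
      else (1, 4001)
  else
    let mid := (lo + hi) / 2
    let r1 := pvSolve conditions lo mid
    let r2 := pvSolve conditions mid hi
    (max r1.1 r2.1, min r1.2 r2.2)
termination_by hi - lo
decreasing_by all_goals omega

def reduce_cond_alt (conditions : List String) : Int × Int :=
  pvSolve conditions 0 conditions.length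

-- ===== PRECONDITION & SPEC =====
-- Pre_ excludes exactly the inputs on which Python A raises ValueError: a condition whose text
-- after its first '<' (or, lacking '<', after its first '>') is not a valid int literal.
def Pre_reduce_cond (conditions : List String) : Prop :=
  ∀ c ∈ conditions,
    (PySem.Str.isIn "<" c = true → (PySem.Int.ofStr? (pvSecond c "<")).isSome = true) ∧
    (PySem.Str.isIn "<" c = false → PySem.Str.isIn ">" c = true →
      (PySem.Int.ofStr? (pvSecond c ">")).isSome = true)
instance (conditions : List String) : Decidable (Pre_reduce_cond conditions) := by
  unfold Pre_reduce_cond; infer_instance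

def pvWitness_reduce_cond : List String := ["x<8", "x>3", "x>5", "y = 2"]

def Spec_reduce_cond (conditions : List String) (out : Int × Int) : Prop := out = reduce_cond_alt conditions
instance (conditions : List String) (out : Int × Int) : Decidable (Spec_reduce_cond conditions out) := by unfold Spec_reduce_cond; infer_instance

-- ===== CLAIM (what is proved, stated in full; the proofs are below) =====
def Claim_equal_reduce_cond : Prop := ∀ (conditions : List String), Dom_reduce_cond conditions → Pre_reduce_cond conditions → Spec_reduce_cond conditions (reduce_cond conditions)

-- ===== LEMMAS AND PROOFS =====

-- proof-side bound pair of a single condition (B's base case for one element)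
def pvLeaf (c : String) : Int × Int :=
  if PySem.Str.isIn "<" c then (1, min (pvIntAfter c "<") 4001)
  else if PySem.Str.isIn ">" c then (max (pvIntAfter c ">") 1, 4001)
  else (1, 4001)

-- proof-side sequential merge of leaf bounds, used to bridge the two ports
def pvM : List String → Int × Int
  | [] => (1, 4001)
  | c :: cs =>
    let r := pvM cs
    (max (pvLeaf c).1 r.1, min (pvLeaf c).2 r.2)

lemma pvM_bounds (conds : List String) :
    1 ≤ (pvM conds).1 ∧ (pvM conds).2 ≤ 4001 := by
  induction conds with
  | nil => simp [pvM]
  | cons c cs ih =>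
    simp only [pvM, pvLeaf]
    split_ifs <;> refine ⟨?_, ?_⟩ <;> omega

lemma pvM_append (xs ys : List String) :
    pvM (xs ++ ys) = (max (pvM xs).1 (pvM ys).1, min (pvM xs).2 (pvM ys).2) := by
  induction xs with
  | nil =>
    have hb := pvM_bounds ys
    simp only [List.nil_append, pvM]
    refine Prod.ext ?_ ?_ <;> dsimp only <;> omega
  | cons c cs ih =>
    simp only [List.cons_append, pvM, ih]
    refine Prod.ext ?_ ?_ <;> dsimp only <;> omega

-- pvSolve on [lo, hi) computes pvM of the corresponding sublist
lemma pvSolve_eq_pvM (conds : List String) (lo hi : Nat) (hlo : lo ≤ hi)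
    (hhi : hi ≤ conds.length) :
    pvSolve conds lo hi = pvM ((conds.drop lo).take (hi - lo)) := by
  fun_induction pvSolve conds lo hi
  case case1 =>
    rename_i heq
    simp [pvM]
  case case2 =>
    rename_i lo hi hle hne c h
    have hlt : lo < conds.length := by omega
    have h1 : hi - lo = 1 := by omega
    have hc : c = conds[lo] := by
      rw [show c = (PySem.List.pyGet? conds (lo : Int)).getD "" from rfl,
          PySem.List.pyGet?_natCast]
      simp [List.getElem?_eq_getElem hlt]
    rw [hc] at h
    rw [h1, List.drop_eq_getElem_cons hlt]
    simp only [List.take_succ_cons, List.take_zero, pvM, pvLeaf, hc, h, if_true]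
    refine Prod.ext ?_ ?_ <;> dsimp only <;> omega
  case case3 =>
    rename_i lo hi hle hne c h1 h2
    have hlt : lo < conds.length := by omega
    have he : hi - lo = 1 := by omega
    have hc : c = conds[lo] := by
      rw [show c = (PySem.List.pyGet? conds (lo : Int)).getD "" from rfl,
          PySem.List.pyGet?_natCast]
      simp [List.getElem?_eq_getElem hlt]
    rw [hc] at h1 h2
    rw [Bool.not_eq_true] at h1
    rw [he, List.drop_eq_getElem_cons hlt]
    simp only [List.take_succ_cons, List.take_zero, pvM, pvLeaf, hc, h1, h2,
      Bool.false_eq_true, if_false, if_true]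
    refine Prod.ext ?_ ?_ <;> dsimp only <;> omega
  case case4 =>
    rename_i lo hi hle hne c h1 h2
    have hlt : lo < conds.length := by omega
    have he : hi - lo = 1 := by omega
    have hc : c = conds[lo] := by
      rw [show c = (PySem.List.pyGet? conds (lo : Int)).getD "" from rfl,
          PySem.List.pyGet?_natCast]
      simp [List.getElem?_eq_getElem hlt]
    rw [hc] at h1 h2
    rw [Bool.not_eq_true] at h1 h2
    rw [he, List.drop_eq_getElem_cons hlt]
    simp only [List.take_succ_cons, List.take_zero, pvM, pvLeaf, h1, h2,
      Bool.false_eq_true, if_false]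
    refine Prod.ext ?_ ?_ <;> dsimp only <;> omega
  case case5 =>
    rename_i lo hi hgt mid r1 r2 ih2 ih1
    have hmdef : mid = (lo + hi) / 2 := rfl
    have e1 : r1 = pvM ((conds.drop lo).take (mid - lo)) := ih2 (by omega) (by omega)
    have e2 : r2 = pvM ((conds.drop mid).take (hi - mid)) := ih1 (by omega) hhi
    clear_value r1 r2 mid
    have hsplit : (conds.drop lo).take (hi - lo)
        = (conds.drop lo).take (mid - lo) ++ ((conds.drop mid).take (hi - mid)) := by
      have h : hi - lo = (mid - lo) + (hi - mid) := by omega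
      rw [h, List.take_add]
      congr 1
      rw [List.drop_drop]
      have hmm : lo + (mid - lo) = mid := by omega
      rw [hmm]
    rw [e1, e2, hsplit, pvM_append]

-- A's forward fold from any in-bound seed equals the sequential merge of leaf bounds
lemma fold_eq_pvM (conds : List String) : ∀ (lt gt : Int), lt ≤ 4001 → 1 ≤ gt →
    conds.foldl
      (fun (st : Int × Int) cond =>
        if PySem.Str.isIn "<" cond then (min st.1 (pvIntAfter cond "<"), st.2)
        else if PySem.Str.isIn ">" cond then (st.1, max st.2 (pvIntAfter cond ">"))
        else st)
      (lt, gt)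
    = (min lt (pvM conds).2, max gt (pvM conds).1) := by
  induction conds with
  | nil =>
    intro lt gt h1 h2
    simp only [List.foldl_nil, pvM, Prod.mk.injEq]
    omega
  | cons c cs ih =>
    intro lt gt h1 h2
    rcases hr : pvM cs with ⟨g, l⟩
    simp only [List.foldl_cons, pvM, pvLeaf, hr]
    split_ifs with hlt hgt
    · rw [ih (min lt (pvIntAfter c "<")) gt (by omega) h2, hr]
      refine Prod.ext ?_ ?_ <;> dsimp only <;> omega
    · rw [ih lt (max gt (pvIntAfter c ">")) h1 (by omega), hr]
      refine Prod.ext ?_ ?_ <;> dsimp only <;> omega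
    · rw [ih lt gt h1 h2, hr]
      refine Prod.ext ?_ ?_ <;> dsimp only <;> omega

-- ===== VERDICT (by name: the statement is the Claim_ definition above) =====
theorem reduce_cond_spec : Claim_equal_reduce_cond := by
  intro conditions _ _
  unfold Spec_reduce_cond reduce_cond reduce_cond_alt
  have hb := pvM_bounds conditions
  rw [fold_eq_pvM conditions 4001 1 (by omega) (by omega),
      pvSolve_eq_pvM conditions 0 conditions.length (by omega) (by omega)]
  simp only [List.drop_zero, Nat.sub_zero, List.take_length]
  refine Prod.ext ?_ ?_ <;> dsimp only <;> omega
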